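-- pv_equiv track=rewrite | github.com/CLQCD/PyQUDA | pyquda_core/pyquda/__init__.py | _factorization4
-- ===== SOURCE A (Python) =====
-- from typing import Any, Callable, Dict, List, Literal, NamedTuple, Tuple, Union
--
-- def _composition4(n):
--     """
--     Writing n as the sum of 4 natural numbers
--     """
--     addend: List[Tuple[int, int, int, int]] = []
--     for i in range(n + 1):
--         for j in range(i, n + 1):
--             for k in range(j, n + 1):
--                 x, y, z, t = i, j - i, k - j, n - k
--                 addend.append((x, y, z, t))
--     return addend
--
-- def _factorization4(k: int):
--     """
--     Writing k as the product of 4 positive numbers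
--     """
--     prime_factor: List[List[Tuple[int, int, int, int]]] = []
--     for p in range(2, int(k**0.5) + 1):
--         n = 0
--         while k % p == 0:
--             n += 1
--             k //= p
--         if n != 0:
--             prime_factor.append([(p**x, p**y, p**z, p**t) for x, y, z, t in _composition4(n)])
--     if k != 1:
--         prime_factor.append([(k**x, k**y, k**z, k**t) for x, y, z, t in _composition4(1)])
--     return prime_factor
-- ===== SOURCE B (Python) =====
-- def _factorization4(k: int):
--     """
--     Writing k as the product of 4 positive numbers
--     """
--
--     def compose(n, parts):
--         # all tuples of `parts` naturals summing to n, in lexicographic order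
--         if parts == 1:
--             return [(n,)]
--         return [(first,) + rest
--                 for first in range(n + 1)
--                 for rest in compose(n - first, parts - 1)]
--
--     def strip(k, p):
--         # divide p out of k completely, returning (exponent, reduced k)
--         if k % p != 0:
--             return 0, k
--         n, k = strip(k // p, p)
--         return n + 1, k
--
--     factors = []
--     for p in range(2, int(k ** 0.5) + 1):
--         n, k = strip(k, p)
--         if n:
--             factors.append((p, n))
--     if k != 1:
--         factors.append((k, 1))
--     return [[(p ** x, p ** y, p ** z, p ** t) for x, y, z, t in compose(n, 4)]
--             for p, n in factors]
-- ===== Notes on version B (the rewrite author's own statement) =====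
-- stated objective: alternative
-- what changed: The unrolled triple i<=j<=k loop over compositions is replaced by a recursive compose(n, parts) generator, repeated division by p becomes a recursive strip helper, and trial division now collects a (prime, exponent) factor list that is mapped to composition blocks afterwards instead of appending result blocks inline.
import Mathlib
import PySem

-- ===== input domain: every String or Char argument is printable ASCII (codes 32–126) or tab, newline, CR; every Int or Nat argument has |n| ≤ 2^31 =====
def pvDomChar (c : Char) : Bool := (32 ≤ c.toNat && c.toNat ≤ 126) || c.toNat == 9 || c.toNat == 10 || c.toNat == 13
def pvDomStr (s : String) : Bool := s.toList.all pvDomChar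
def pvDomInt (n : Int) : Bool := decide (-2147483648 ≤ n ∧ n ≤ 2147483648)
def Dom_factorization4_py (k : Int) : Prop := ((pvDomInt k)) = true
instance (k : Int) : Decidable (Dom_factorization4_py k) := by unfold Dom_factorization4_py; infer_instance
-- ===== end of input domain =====

-- B replaces A's unrolled triple loop over compositions by a recursive composition
-- generator and splits trial division into a factor list that is mapped afterwards
-- (objective: alternative decomposition, same cost).

-- ===== PORT A =====

-- _composition4: the triple nested loop, appending (i, j-i, k-j, n-k)
def composition4A (n : Int) : List (Int × Int × Int × Int) :=
  (PySem.List.pyRange 0 (n + 1) 1).foldl (fun acc i =>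
    (PySem.List.pyRange i (n + 1) 1).foldl (fun acc j =>
      (PySem.List.pyRange j (n + 1) 1).foldl (fun acc k =>
        acc ++ [(i, j - i, k - j, n - k)]) acc) acc) []

-- the 'while k % p == 0: n += 1; k //= p' loop; fuel makes it total (the loop
-- terminates in Python for k ≥ 1; fuel k.toNat always suffices there)
def divLoopA (p : Int) : Int → Int → Nat → Int × Int
  | k, n, 0 => (n, k)
  | k, n, fuel + 1 =>
    if PySem.Int.mod k p = 0 then divLoopA p (PySem.Int.floordiv k p) (n + 1) fuel
    else (n, k)

-- the comprehension [(b**x, b**y, b**z, b**t) for x, y, z, t in …] (used twice in A);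
-- exponents reaching it are ≥ 0, so Python's b**x is b ^ x.toNat
def powListA (b : Int) (l : List (Int × Int × Int × Int)) : List (Int × Int × Int × Int) :=
  l.map (fun q => (b ^ q.1.toNat, b ^ q.2.1.toNat, b ^ q.2.2.1.toNat, b ^ q.2.2.2.toNat))

-- int(k**0.5): exact as Nat.sqrt on 0 ≤ k ≤ 2^31 (float sqrt is correctly rounded there)
def factorization4_py (k : Int) : List (List (Int × Int × Int × Int)) :=
  let st := (PySem.List.pyRange 2 ((Nat.sqrt k.toNat : Int) + 1) 1).foldl
    (fun (st : Int × List (List (Int × Int × Int × Int))) p =>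
      let nk := divLoopA p st.1 0 st.1.toNat
      if nk.1 ≠ 0 then (nk.2, st.2 ++ [powListA p (composition4A nk.1)])
      else (nk.2, st.2)) (k, [])
  if st.1 ≠ 1 then st.2 ++ [powListA st.1 (composition4A 1)] else st.2

-- ===== PORT B =====

-- compose(n, parts): recursive composition generator; a Python tuple of `parts`
-- naturals is a List Int here (the length varies with `parts`)
def composeB : Int → Nat → List (List Int)
  | _, 0 => []                                   -- not reachable: Python calls have parts ≥ 1
  | n, 1 => [[n]]
  | n, parts + 2 =>
    (PySem.List.pyRange 0 (n + 1) 1).flatMap (fun first =>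
      (composeB (n - first) (parts + 1)).map (fun rest => first :: rest))

-- strip(k, p): recursive division, fuel-totalised exactly like A's while loop
def stripB (p : Int) : Int → Nat → Int × Int
  | k, 0 => (0, k)
  | k, fuel + 1 =>
    if PySem.Int.mod k p ≠ 0 then (0, k)
    else
      let r := stripB p (PySem.Int.floordiv k p) fuel
      (r.1 + 1, r.2)

-- the 'for x, y, z, t in compose(n, 4)' unpacking of one 4-tuple
def powTupB (b : Int) : List Int → Int × Int × Int × Int
  | [x, y, z, t] => (b ^ x.toNat, b ^ y.toNat, b ^ z.toNat, b ^ t.toNat)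
  | _ => (1, 1, 1, 1)                            -- unreachable: compose(n, 4) yields 4-tuples

def factorization4_py_alt (k : Int) : List (List (Int × Int × Int × Int)) :=
  let st := (PySem.List.pyRange 2 ((Nat.sqrt k.toNat : Int) + 1) 1).foldl
    (fun (st : Int × List (Int × Int)) p =>
      let nk := stripB p st.1 st.1.toNat
      if nk.1 ≠ 0 then (nk.2, st.2 ++ [(p, nk.1)]) else (nk.2, st.2)) (k, [])
  let factors := if st.1 ≠ 1 then st.2 ++ [(st.1, 1)] else st.2
  factors.map (fun pn => (composeB pn.2 4).map (powTupB pn.1))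

-- ===== PRECONDITION & SPEC =====
-- Pre_ excludes negative k, on which Python A raises TypeError (k**0.5 is complex there).
def Pre_factorization4_py (k : Int) : Prop := 0 ≤ k
instance (k : Int) : Decidable (Pre_factorization4_py k) := by unfold Pre_factorization4_py; infer_instance
def pvWitness_factorization4_py : Int := 12

def Spec_factorization4_py (k : Int) (out : List (List (Int × Int × Int × Int))) : Prop := out = factorization4_py_alt k
instance (k : Int) (out : List (List (Int × Int × Int × Int))) : Decidable (Spec_factorization4_py k out) := by unfold Spec_factorization4_py; infer_instance

-- ===== CLAIM (what is proved, stated in full; the proofs are below) =====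
def Claim_equal_factorization4_py : Prop := ∀ (k : Int), Dom_factorization4_py k → Pre_factorization4_py k → Spec_factorization4_py k (factorization4_py k)

-- ===== LEMMAS AND PROOFS =====

theorem divLoopA_eq_stripB (p : Int) : ∀ (fuel : Nat) (k n : Int),
    divLoopA p k n fuel = ((stripB p k fuel).1 + n, (stripB p k fuel).2) := by
  intro fuel
  induction fuel with
  | zero => intro k n; simp [divLoopA, stripB]
  | succ f ih =>
    intro k n
    by_cases h : PySem.Int.mod k p = 0
    · simp [divLoopA, stripB, h, ih]
      ring
    · simp [divLoopA, stripB, h]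

theorem pyRange_map_shift {α : Type} (a c : Int) (f : Int → α) :
    (PySem.List.pyRange a c 1).map f = (PySem.List.pyRange 0 (c - a) 1).map (fun t => f (a + t)) := by
  rw [PySem.List.pyRange_one a c, PySem.List.pyRange_one 0 (c - a)]
  simp [List.map_map, Function.comp]

theorem pyRange_flatMap_shift {α : Type} (a c : Int) (f : Int → List α) :
    (PySem.List.pyRange a c 1).flatMap f = (PySem.List.pyRange 0 (c - a) 1).flatMap (fun t => f (a + t)) := by
  rw [PySem.List.pyRange_one a c, PySem.List.pyRange_one 0 (c - a)]
  simp [List.flatMap_map]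

theorem composition4A_shape (n : Int) :
    composition4A n = (PySem.List.pyRange 0 (n + 1) 1).flatMap (fun i =>
      (PySem.List.pyRange i (n + 1) 1).flatMap (fun j =>
        (PySem.List.pyRange j (n + 1) 1).map (fun k => (i, j - i, k - j, n - k)))) := by
  simp only [composition4A, PySem.List.foldl_append_singleton_eq_map,
    PySem.List.foldl_append_eq_flatMap]
  simp

theorem composeB_two (m : Int) :
    composeB m 2 = (PySem.List.pyRange 0 (m + 1) 1).map (fun z => [z, m - z]) := by
  show (PySem.List.pyRange 0 (m + 1) 1).flatMap (fun first =>
      (composeB (m - first) 1).map (fun rest => first :: rest)) = _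
  rw [List.map_eq_flatMap]
  refine congrArg (fun f => List.flatMap f _) (funext fun z => ?_)
  rfl

theorem composeB_three (m : Int) :
    composeB m 3 = (PySem.List.pyRange 0 (m + 1) 1).flatMap (fun y =>
      (PySem.List.pyRange 0 (m - y + 1) 1).map (fun z => [y, z, m - y - z])) := by
  show (PySem.List.pyRange 0 (m + 1) 1).flatMap (fun first =>
      (composeB (m - first) 2).map (fun rest => first :: rest)) = _
  refine congrArg (fun f => List.flatMap f _) (funext fun y => ?_)
  rw [composeB_two, List.map_map]
  rfl

theorem composeB_four (n : Int) :
    composeB n 4 = (PySem.List.pyRange 0 (n + 1) 1).flatMap (fun x =>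
      (PySem.List.pyRange 0 (n - x + 1) 1).flatMap (fun y =>
        (PySem.List.pyRange 0 (n - x - y + 1) 1).map (fun z => [x, y, z, n - x - y - z]))) := by
  show (PySem.List.pyRange 0 (n + 1) 1).flatMap (fun first =>
      (composeB (n - first) 3).map (fun rest => first :: rest)) = _
  refine congrArg (fun f => List.flatMap f _) (funext fun x => ?_)
  rw [composeB_three, List.map_flatMap]
  refine congrArg (fun f => List.flatMap f _) (funext fun y => ?_)
  simp [List.map_map, Function.comp]

theorem powListA_composition4A (b n : Int) :
    powListA b (composition4A n) = (composeB n 4).map (powTupB b) := by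
  rw [composition4A_shape, composeB_four, powListA]
  simp only [List.map_flatMap, List.map_map]
  refine congrArg (fun f => List.flatMap f _) (funext fun x => ?_)
  rw [pyRange_flatMap_shift x (n + 1)]
  have h1 : n + 1 - x = n - x + 1 := by ring
  rw [h1]
  refine congrArg (fun f => List.flatMap f _) (funext fun y => ?_)
  rw [pyRange_map_shift (x + y) (n + 1)]
  have h2 : n + 1 - (x + y) = n - x - y + 1 := by ring
  rw [h2]
  refine congrArg (fun f => List.map f _) (funext fun z => ?_)
  have e1 : x + y - x = y := by ring
  have e2 : x + y + z - (x + y) = z := by ring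
  have e3 : n - (x + y + z) = n - x - y - z := by ring
  simp [powTupB, Function.comp, e1, e2, e3]

-- the fold invariant: A's accumulator is the image of B's factor list
theorem fold_eq (l : List Int) : ∀ (k : Int) (fact : List (Int × Int)),
    l.foldl (fun (st : Int × List (List (Int × Int × Int × Int))) p =>
        let nk := divLoopA p st.1 0 st.1.toNat
        if nk.1 ≠ 0 then (nk.2, st.2 ++ [powListA p (composition4A nk.1)])
        else (nk.2, st.2))
      (k, fact.map (fun pn => powListA pn.1 (composition4A pn.2)))
    = ((l.foldl (fun (st : Int × List (Int × Int)) p =>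
          let nk := stripB p st.1 st.1.toNat
          if nk.1 ≠ 0 then (nk.2, st.2 ++ [(p, nk.1)]) else (nk.2, st.2)) (k, fact)).1,
       (l.foldl (fun (st : Int × List (Int × Int)) p =>
          let nk := stripB p st.1 st.1.toNat
          if nk.1 ≠ 0 then (nk.2, st.2 ++ [(p, nk.1)]) else (nk.2, st.2)) (k, fact)).2.map
         (fun pn => powListA pn.1 (composition4A pn.2))) := by
  induction l with
  | nil => intro k fact; rfl
  | cons p l ih =>
    intro k fact
    simp only [List.foldl_cons, divLoopA_eq_stripB, add_zero]
    simp only [divLoopA_eq_stripB, add_zero] at ih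
    by_cases h : (stripB p k k.toNat).1 ≠ 0
    · rw [if_pos h, if_pos h]
      have hmap : List.map (fun pn => powListA pn.1 (composition4A pn.2)) fact ++
          [powListA p (composition4A (stripB p k k.toNat).1)] =
          (fact ++ [(p, (stripB p k k.toNat).1)]).map
            (fun pn => powListA pn.1 (composition4A pn.2)) := by simp
      rw [hmap]
      exact ih _ _
    · rw [if_neg h, if_neg h]
      exact ih _ _

-- the tail step: appending the residual factor commutes with mapping the block function
theorem final_eq (st : Int × List (Int × Int)) :
    (if st.1 ≠ 1 then
        st.2.map (fun pn => powListA pn.1 (composition4A pn.2)) ++ [powListA st.1 (composition4A 1)]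
      else st.2.map (fun pn => powListA pn.1 (composition4A pn.2)))
    = (if st.1 ≠ 1 then st.2 ++ [(st.1, 1)] else st.2).map
        (fun pn => (composeB pn.2 4).map (powTupB pn.1)) := by
  have hfun : (fun pn : Int × Int => (composeB pn.2 4).map (powTupB pn.1)) =
      (fun pn : Int × Int => powListA pn.1 (composition4A pn.2)) :=
    funext fun pn => (powListA_composition4A pn.1 pn.2).symm
  rw [hfun]
  by_cases h : st.1 ≠ 1 <;> simp [h]

-- ===== VERDICT (by name: the statement is the Claim_ definition above) =====
theorem factorization4_py_spec : Claim_equal_factorization4_py := by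
  intro k _ _
  unfold Spec_factorization4_py factorization4_py factorization4_py_alt
  have h := fold_eq (PySem.List.pyRange 2 ((Nat.sqrt k.toNat : Int) + 1) 1) k []
  simp only [List.map_nil] at h
  rw [h]
  exact final_eq _
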